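-- pv_equiv track=rewrite | github.com/phamhung3589/LearnPython | dynamic_programming/partition_problem.py | is_partition
-- ===== SOURCE A (Python) =====
-- def is_partition(arr, sum, n):
--     # base case
--     if sum == 0:
--         return True
--     if n == 0 and sum != 0:
--         return False
--
--     # is last element is greater than sum, then ignore it
--     if arr[n-1] > sum:
--         return is_partition(arr, sum, n-1)
--
--     # Else, check if sum can be obtained by any of the following:
--     # (1): including the last element
--     # (2): excluding the last element
--     return is_partition(arr, sum, n-1) or is_partition(arr, sum-arr[n-1], n-1)
-- ===== SOURCE B (Python) =====
-- def is_partition(arr, sum, n):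
--     # Iterative breadth-first pass over the set of remaining target sums.
--     targets = {sum}
--     for k in range(n, 0, -1):
--         if 0 in targets:
--             return True
--         a = arr[k - 1]
--         targets |= {t - a for t in targets if a <= t}
--     return 0 in targets
-- ===== Notes on version B (the rewrite author's own statement) =====
-- stated objective: alternative
-- what changed: Replaces A's exponential include/exclude branching recursion by a single forward loop that maintains the set of still-reachable target sums (breadth-first DP over distinct sums), so each element is processed once against a deduplicated set of states.
import Mathlib
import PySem

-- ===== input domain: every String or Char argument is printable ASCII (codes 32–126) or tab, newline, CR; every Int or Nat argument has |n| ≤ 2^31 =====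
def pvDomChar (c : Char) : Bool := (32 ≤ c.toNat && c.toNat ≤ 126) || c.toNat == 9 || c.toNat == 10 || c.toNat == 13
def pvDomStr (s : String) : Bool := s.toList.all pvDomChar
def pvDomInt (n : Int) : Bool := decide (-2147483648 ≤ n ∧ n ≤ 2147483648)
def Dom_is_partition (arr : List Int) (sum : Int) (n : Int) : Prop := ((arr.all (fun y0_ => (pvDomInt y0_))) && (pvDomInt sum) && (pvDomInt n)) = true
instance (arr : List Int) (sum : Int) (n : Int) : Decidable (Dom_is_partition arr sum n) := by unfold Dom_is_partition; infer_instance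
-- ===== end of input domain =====

-- B replaces A's branching include/exclude recursion by one forward pass maintaining the
-- set of still-reachable target sums (objective: alternative algorithm).

-- ===== PORT A =====
-- Literal transliteration of A's recursion; the 'n < 0' branch is a totality guard only
-- (outside Pre_, where Python A recurses into an IndexError); termination by n.toNat.
def is_partition (arr : List Int) (sum : Int) (n : Int) : Bool :=
  if sum == 0 then true
  else if n == 0 then false
  else if n < 0 then false  -- totality guard, unreachable under Pre_
  else match PySem.List.pyGet? arr (n - 1) with
    | none => false        -- IndexError in Python, unreachable under Pre_
    | some a =>
      if a > sum then is_partition arr sum (n - 1)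
      else is_partition arr sum (n - 1) || is_partition arr (sum - a) (n - 1)
termination_by n.toNat
decreasing_by all_goals (simp only [beq_iff_eq, not_lt] at *; omega)

-- ===== PORT B =====
-- B's loop 'for k in range(n, 0, -1)' with the set of remaining target sums;
-- fuel k corresponds to Python's loop variable k, element arr[k-1].
def pvLoopB (arr : List Int) (targets : PySem.Set Int) : Nat → Bool
  | 0 => PySem.Set.contains targets 0
  | Nat.succ m =>
    if PySem.Set.contains targets 0 then true
    else match arr[m]? with    -- arr[k-1], index k-1 = m ≥ 0 (exact: nonnegative index)
      | none => false          -- IndexError in Python, unreachable under Pre_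
      | some a =>
        pvLoopB arr
          (PySem.Set.union targets
            (PySem.Set.ofList ((targets.filter (fun t => a ≤ t)).map (fun t => t - a)))) m

def is_partition_alt (arr : List Int) (sum : Int) (n : Int) : Bool :=
  pvLoopB arr (PySem.Set.ofList [sum]) n.toNat

-- ===== PRECONDITION & SPEC =====
-- Pre_ excludes exactly the inputs where Python A raises (IndexError/RecursionError):
-- sum ≠ 0 together with n < 0 or n > len(arr).
def Pre_is_partition (arr : List Int) (sum : Int) (n : Int) : Prop :=
  sum = 0 ∨ (0 ≤ n ∧ n ≤ arr.length)
instance (arr : List Int) (sum : Int) (n : Int) : Decidable (Pre_is_partition arr sum n) := by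
  unfold Pre_is_partition; infer_instance

def pvWitness_is_partition : List Int × Int × Int := ([3, 1, 5, 9, 12], 22, 5)

def Spec_is_partition (arr : List Int) (sum : Int) (n : Int) (out : Bool) : Prop :=
  out = is_partition_alt arr sum n
instance (arr : List Int) (sum : Int) (n : Int) (out : Bool) : Decidable (Spec_is_partition arr sum n out) := by
  unfold Spec_is_partition; infer_instance

-- ===== CLAIM (what is proved, stated in full; the proofs are below) =====
def Claim_equal_is_partition : Prop := ∀ (arr : List Int) (sum : Int) (n : Int), Dom_is_partition arr sum n → Pre_is_partition arr sum n → Spec_is_partition arr sum n (is_partition arr sum n)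

-- ===== LEMMAS AND PROOFS =====

-- A's recursion restated over a Nat index (proof helper; equal to the Int port for 0 ≤ n).
def pvA (arr : List Int) (sum : Int) : Nat → Bool
  | 0 => sum == 0
  | Nat.succ m =>
    if sum == 0 then true
    else match arr[m]? with
      | none => false
      | some a =>
        if a > sum then pvA arr sum m
        else pvA arr sum m || pvA arr (sum - a) m

theorem pvA_eq (arr : List Int) (k : Nat) :
    ∀ sum : Int, is_partition arr sum (k : Int) = pvA arr sum k := by
  induction k with
  | zero =>
    intro sum
    rw [is_partition, pvA]
    by_cases hs : (sum == 0) = true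
    · simp [hs]
    · simp [hs]
  | succ m ih =>
    intro sum
    rw [is_partition, pvA]
    have hcast : (((m + 1 : Nat) : Int)) - 1 = ((m : Nat) : Int) := by push_cast; ring
    rw [hcast, PySem.List.pyGet?_natCast]
    have h1 : ((((m + 1 : Nat) : Int)) == 0) = false := by
      simp only [beq_eq_false_iff_ne, ne_eq]
      push_cast; omega
    have h2 : ¬ ((((m + 1 : Nat) : Int)) < 0) := by push_cast; omega
    by_cases hs : (sum == 0) = true
    · simp [hs]
    · simp only [hs, h1, if_neg h2, Bool.false_eq_true, if_false]
      cases arr[m]? with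
      | none => rfl
      | some a =>
        by_cases hgt : a > sum
        · simp [hgt, ih]
        · simp [hgt, ih]

theorem pvA_zero_of_zero (arr : List Int) (k : Nat) : pvA arr 0 k = true := by
  cases k <;> simp [pvA]

-- membership in B's one-step set update
theorem mem_pvStep (targets : PySem.Set Int) (a u : Int) :
    u ∈ PySem.Set.union targets
        (PySem.Set.ofList ((targets.filter (fun t => a ≤ t)).map (fun t => t - a)))
      ↔ u ∈ targets ∨ ∃ t ∈ targets, a ≤ t ∧ u = t - a := by
  rw [PySem.Set.mem_union, PySem.Set.mem_ofList]
  simp only [List.mem_map, List.mem_filter]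
  constructor
  · rintro (h | ⟨t, ⟨ht, ha⟩, rfl⟩)
    · exact Or.inl h
    · exact Or.inr ⟨t, ht, by simpa using ha, rfl⟩
  · rintro (h | ⟨t, ht, ha, rfl⟩)
    · exact Or.inl h
    · exact Or.inr ⟨t, ⟨ht, by simpa using ha⟩, rfl⟩

-- B's loop is true iff A's recursion is true on some remaining target
theorem pvLoopB_iff (arr : List Int) (k : Nat) :
    ∀ targets : PySem.Set Int,
      (pvLoopB arr targets k = true ↔ ∃ t ∈ targets, pvA arr t k = true) := by
  induction k with
  | zero =>
    intro targets
    rw [pvLoopB]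
    rw [PySem.Set.contains_iff]
    constructor
    · intro h; exact ⟨0, h, by simp [pvA]⟩
    · rintro ⟨t, ht, hAt⟩
      have : t = 0 := by simpa [pvA] using hAt
      simpa [this] using ht
  | succ m ih =>
    intro targets
    rw [pvLoopB]
    by_cases h0 : PySem.Set.contains targets 0 = true
    · rw [if_pos h0]
      simp only [true_iff]
      exact ⟨0, (PySem.Set.contains_iff targets 0).mp h0, by simp [pvA]⟩
    · rw [if_neg h0]
      have h0' : (0 : Int) ∉ targets := fun h => h0 ((PySem.Set.contains_iff targets 0).mpr h)
      cases hidx : arr[m]? with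
      | none =>
        constructor
        · intro h; exact absurd h (by simp)
        · rintro ⟨t, ht, hAt⟩
          have htne : (t == 0) = false := by
            simp only [beq_eq_false_iff_ne, ne_eq]; rintro rfl; exact h0' ht
          rw [pvA, htne] at hAt
          simp [hidx] at hAt
      | some a =>
        rw [ih]
        constructor
        · rintro ⟨u, hu, hAu⟩
          rcases (mem_pvStep targets a u).mp hu with h | ⟨t, ht, ha, rfl⟩
          · refine ⟨u, h, ?_⟩
            have hune : (u == 0) = false := by
              simp only [beq_eq_false_iff_ne, ne_eq]; rintro rfl; exact h0' h
            by_cases hgt : a > u <;> simp [pvA, hune, hidx, hgt, hAu]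
          · refine ⟨t, ht, ?_⟩
            have htne : (t == 0) = false := by
              simp only [beq_eq_false_iff_ne, ne_eq]; rintro rfl; exact h0' ht
            have hgt : ¬ (a > t) := not_lt.mpr ha
            simp [pvA, htne, hidx, hgt, hAu]
        · rintro ⟨t, ht, hAt⟩
          have htne : (t == 0) = false := by
            simp only [beq_eq_false_iff_ne, ne_eq]; rintro rfl; exact h0' ht
          rw [pvA, htne] at hAt
          simp only [Bool.false_eq_true, if_false, hidx] at hAt
          by_cases hgt : a > t
          · rw [if_pos hgt] at hAt
            exact ⟨t, (mem_pvStep targets a t).mpr (Or.inl ht), hAt⟩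
          · rw [if_neg hgt] at hAt
            rcases Bool.or_eq_true_iff.mp hAt with hAt | hAt
            · exact ⟨t, (mem_pvStep targets a t).mpr (Or.inl ht), hAt⟩
            · exact ⟨t - a, (mem_pvStep targets a (t - a)).mpr
                (Or.inr ⟨t, ht, not_lt.mp hgt, rfl⟩), hAt⟩

-- ===== VERDICT (by name: the statement is the Claim_ definition above) =====
theorem is_partition_spec : Claim_equal_is_partition := by
  intro arr sum n _ hpre
  unfold Spec_is_partition is_partition_alt
  by_cases hs : sum = 0
  · subst hs
    rw [is_partition]
    simp only [beq_self_eq_true, if_true]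
    have : ∃ t ∈ PySem.Set.ofList [(0 : Int)], pvA arr t n.toNat = true :=
      ⟨0, by simp [PySem.Set.mem_ofList], pvA_zero_of_zero arr n.toNat⟩
    exact ((pvLoopB_iff arr n.toNat _).mpr this).symm
  · rcases hpre with h | ⟨hn0, _⟩
    · exact absurd h hs
    · have hn : n = (n.toNat : Int) := by omega
      rw [hn, pvA_eq]
      rw [Bool.eq_iff_iff, pvLoopB_iff]
      constructor
      · intro h
        exact ⟨sum, by simp [PySem.Set.mem_ofList], h⟩
      · rintro ⟨t, ht, hAt⟩
        rw [PySem.Set.mem_ofList] at ht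
        simp only [List.mem_singleton] at ht
        subst ht
        exact hAt
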